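-- pv_equiv track=rewrite | github.com/qiskit-community/qiskit-ionq | qiskit/providers/ionq/ionq_job.py | _remap_bitstring
-- ===== SOURCE A (Python) =====
-- def _remap_bitstring(bitstring, output_map, output_length):
--     """IonQ's API does not allow ad-hoc remapping of classical to quantum registers,
--     instead always returning quantum[i] as classical[i] in the return bitstring.
--     This uses an output map created at submission from the measure instructions in the
--     instruction list to map to the expected classical bitstring.
--     """
--     bin_output = list("0" * output_length)
--     bin_input = list(bin(int(bitstring))[2:].rjust(output_length, "0"))
--     bin_input.reverse()
--
--     for quantum, classical in output_map.items():
--         bin_output[int(classical)] = bin_input[int(quantum)]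
--     bin_output.reverse()
--     return hex(int("".join(bin_output), 2))
-- ===== SOURCE B (Python) =====
-- def _remap_bitstring(bitstring, output_map, output_length):
--     """Remap quantum bit positions to classical positions with integer bit
--     arithmetic: no char-list building, reversing or bin/join round-trips."""
--     val = int(bitstring)
--     result = 0
--     for quantum, classical in output_map.items():
--         result |= ((val >> int(quantum)) & 1) << int(classical)
--     return hex(result)
-- ===== Notes on version B (the rewrite author's own statement) =====
-- stated objective: simpler
-- what changed: B replaces A's build-a-char-list / double-reverse / bin-join-int round-trip by a single integer bit accumulator: result |= ((val >> quantum) & 1) << classical, then hex(result).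
-- outside the precondition, e.g. on _remap_bitstring('-3', {'1': '0'}, 1): A returns '0x1', B returns '0x0'; on _remap_bitstring('1', {'0': '-1'}, 2): A returns '0x2', B raises ValueError; on _remap_bitstring('1', {'0': '0', '1': '0'}, 2): A returns '0x0', B returns '0x1'
import Mathlib
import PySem

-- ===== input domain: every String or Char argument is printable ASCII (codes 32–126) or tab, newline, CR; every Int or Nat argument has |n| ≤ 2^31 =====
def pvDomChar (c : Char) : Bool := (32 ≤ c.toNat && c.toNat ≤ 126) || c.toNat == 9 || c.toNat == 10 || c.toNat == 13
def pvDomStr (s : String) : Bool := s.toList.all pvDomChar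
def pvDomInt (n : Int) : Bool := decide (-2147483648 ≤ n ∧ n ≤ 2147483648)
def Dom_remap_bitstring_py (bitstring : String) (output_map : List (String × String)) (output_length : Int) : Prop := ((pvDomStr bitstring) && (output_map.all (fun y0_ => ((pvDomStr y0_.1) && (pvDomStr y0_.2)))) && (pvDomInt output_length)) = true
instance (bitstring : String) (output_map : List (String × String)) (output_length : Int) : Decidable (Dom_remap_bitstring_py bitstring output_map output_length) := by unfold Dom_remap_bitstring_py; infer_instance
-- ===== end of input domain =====

-- B replaces A's char-list build / double reverse / bin-join-parse round-trip by a single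
-- integer bit accumulator (objective: simpler); equivalence is about the return value only.

-- ===== PORT A =====
-- shared output formatting: Python's hex(n) for n ≥ 0 (both Pythons end with hex(...))
def hexDigit (n : Nat) : Char := if n < 10 then Char.ofNat (48 + n) else Char.ofNat (87 + n)

def hexCore (n : Nat) : List Char :=
  if h : n = 0 then [] else hexCore (n / 16) ++ [hexDigit (n % 16)]
decreasing_by exact Nat.div_lt_self (Nat.pos_of_ne_zero h) (by omega)

-- hex(n) for n ≥ 0 (inside Pre_ the argument is always ≥ 0)
def pyHex (n : Nat) : String := String.ofList ('0' :: 'x' :: (if n = 0 then ['0'] else hexCore n))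

-- binary digits of n, least significant first (empty for 0)
def lsbCore (n : Nat) : List Char :=
  if h : n = 0 then [] else (if n % 2 = 1 then '1' else '0') :: lsbCore (n / 2)
decreasing_by exact Nat.div_lt_self (Nat.pos_of_ne_zero h) (by omega)

-- bin(n)[2:] as a char list; exact for the n ≥ 0 admitted by Pre_
def binMSB (n : Nat) : List Char := if n = 0 then ['0'] else (lsbCore n).reverse

-- int(s, 2); exact on the nonempty '0'/'1' strings this port feeds it under Pre_
def parseBin (cs : List Char) : Nat := cs.foldl (fun a c => 2 * a + (if c = '1' then 1 else 0)) 0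

-- loop body of A: bin_output[int(classical)] = bin_input[int(quantum)]
-- (pyGet? none = IndexError, then getD's default is irrelevant: Pre_ excludes it; pySetD is
-- Python's index assignment incl. negative wrap, total form exact under Pre_'s in-range bound)
def stepA (binInput : List Char) (bo : List Char) (p : String × String) : List Char :=
  PySem.List.pySetD bo ((PySem.Int.ofStr? p.2).getD 0)
    ((PySem.List.pyGet? binInput ((PySem.Int.ofStr? p.1).getD 0)).getD '0')

def remap_bitstring_py (bitstring : String) (output_map : List (String × String)) (output_length : Int) : String :=
  -- bin_output = list("0" * output_length)
  let binOutput : List Char := List.replicate output_length.toNat '0'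
  -- int(bitstring); none = ValueError, excluded by Pre_
  let v : Int := (PySem.Int.ofStr? bitstring).getD 0
  -- bin(int(bitstring))[2:]  (exact for v ≥ 0, which Pre_ guarantees)
  let binStr : List Char := binMSB v.toNat
  -- .rjust(output_length, "0") as a char list, then .reverse()
  let binInput : List Char := (List.replicate (output_length.toNat - binStr.length) '0' ++ binStr).reverse
  -- for quantum, classical in output_map.items(): bin_output[int(classical)] = bin_input[int(quantum)]
  let out : List Char := output_map.foldl (stepA binInput) binOutput
  -- hex(int("".join(reversed), 2))
  pyHex (parseBin out.reverse)

-- ===== PORT B =====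
-- loop body of B: result |= ((val >> int(quantum)) & 1) << int(classical)
-- (computed in Nat: Pre_ guarantees val, quantum and classical are all ≥ 0, where this is exact)
def stepB (v : Nat) (r : Nat) (p : String × String) : Nat :=
  r ||| (((v >>> ((PySem.Int.ofStr? p.1).getD 0).toNat) &&& 1) <<< ((PySem.Int.ofStr? p.2).getD 0).toNat)

def remap_bitstring_py_alt (bitstring : String) (output_map : List (String × String)) (output_length : Int) : String :=
  let v : Int := (PySem.Int.ofStr? bitstring).getD 0
  let result : Nat := output_map.foldl (stepB v.toNat) 0
  pyHex result

-- ===== PRECONDITION & SPEC =====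
-- Pre_ excludes inputs where A raises (unparseable ints, output_length < 1, index out of range),
-- negative-value/negative-index corners where A's returned value is an accident of slicing
-- '-0b…' or of Python's negative-index wraparound (B raises or differs there), and duplicate
-- classical targets, where A's last-write-wins and B's accumulated bit are equally defensible.
def Pre_remap_bitstring_py (bitstring : String) (output_map : List (String × String)) (output_length : Int) : Prop :=
  1 ≤ output_length ∧
  (PySem.Int.ofStr? bitstring).isSome ∧
  0 ≤ (PySem.Int.ofStr? bitstring).getD 0 ∧
  (∀ p ∈ output_map,
    (PySem.Int.ofStr? p.1).isSome ∧ (PySem.Int.ofStr? p.2).isSome ∧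
    0 ≤ (PySem.Int.ofStr? p.1).getD 0 ∧ 0 ≤ (PySem.Int.ofStr? p.2).getD 0 ∧
    (PySem.Int.ofStr? p.2).getD 0 < output_length ∧
    ((PySem.Int.ofStr? p.1).getD 0 < output_length ∨
      2 ^ ((PySem.Int.ofStr? p.1).getD 0).toNat ≤ (PySem.Int.ofStr? bitstring).getD 0)) ∧
  (output_map.map (fun p => PySem.Int.ofStr? p.2)).Pairwise (· ≠ ·)
instance (bitstring : String) (output_map : List (String × String)) (output_length : Int) : Decidable (Pre_remap_bitstring_py bitstring output_map output_length) := by unfold Pre_remap_bitstring_py; infer_instance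

def pvWitness_remap_bitstring_py : String × (List (String × String)) × Int := ("5", [("0", "1"), ("1", "0")], 2)

def Spec_remap_bitstring_py (bitstring : String) (output_map : List (String × String)) (output_length : Int) (out : String) : Prop := out = remap_bitstring_py_alt bitstring output_map output_length
instance (bitstring : String) (output_map : List (String × String)) (output_length : Int) (out : String) : Decidable (Spec_remap_bitstring_py bitstring output_map output_length out) := by unfold Spec_remap_bitstring_py; infer_instance

-- ===== CLAIM (what is proved, stated in full; the proofs are below) =====
def Claim_equal_remap_bitstring_py : Prop := ∀ (bitstring : String) (output_map : List (String × String)) (output_length : Int), Dom_remap_bitstring_py bitstring output_map output_length → Pre_remap_bitstring_py bitstring output_map output_length → Spec_remap_bitstring_py bitstring output_map output_length (remap_bitstring_py bitstring output_map output_length)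
-- ===== LEMMAS AND PROOFS =====

-- A's bin_output value as a number: bit i of the char list, LSB first
def vOf : List Char → Nat
  | [] => 0
  | c :: t => (if c = '1' then 1 else 0) + 2 * vOf t

theorem getD_set_eq (l : List Char) (i : Nat) (a : Char) (j : Nat) (d : Char) :
    (l.set i a).getD j d = if i = j ∧ j < l.length then a else l.getD j d := by
  simp [List.getD_eq_getElem?_getD, List.getElem?_set]
  split <;> rename_i h1
  · split <;> simp_all
  · by_cases h : i = j ∧ j < l.length <;> simp_all

theorem pySetD_in (bo : List Char) (c : Int) (ch : Char) (h0 : 0 ≤ c) (h1 : c < (bo.length : Int)) :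
    PySem.List.pySetD bo c ch = bo.set c.toNat ch := by
  simp only [PySem.List.pySetD, PySem.List.pySet?, PySem.List.pyIdx?]
  rw [if_pos h0, if_pos h1]; simp

theorem pyGet_in (xs : List Char) (q : Int) (h0 : 0 ≤ q) (h1 : q < (xs.length : Int)) :
    (PySem.List.pyGet? xs q).getD '0' = xs.getD q.toNat '0' := by
  simp only [PySem.List.pyGet?, PySem.List.pyIdx?]
  rw [if_pos h0, if_pos h1]
  simp [List.getD_eq_getElem?_getD]

theorem testBit_mod (n i : Nat) : n.testBit i = decide ((n >>> i) % 2 = 1) := by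
  rw [Nat.testBit, Nat.one_and_eq_mod_two]
  have : n >>> i % 2 = 0 ∨ n >>> i % 2 = 1 := by omega
  rcases this with h | h <;> simp [h]

theorem getD_replicate (m k : Nat) : (List.replicate m '0').getD k '0' = '0' := by
  simp [List.getD_eq_getElem?_getD, List.getElem?_replicate]; split <;> simp

theorem getD_append_split (l l' : List Char) (k : Nat) (d : Char) :
    (l ++ l').getD k d = if k < l.length then l.getD k d else l'.getD (k - l.length) d := by
  split <;> rename_i h
  · simp [List.getD_eq_getElem?_getD, List.getElem?_append_left h]
  · simp [List.getD_eq_getElem?_getD, List.getElem?_append_right (by omega : l.length ≤ k)]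

theorem testBit_one (j : Nat) : Nat.testBit 1 j = decide (j = 0) := by
  cases j with
  | zero => simp
  | succ k => rw [Nat.testBit_add_one]; simp

theorem lsbCore_getD (n : Nat) : ∀ k, (lsbCore n).getD k '0' = if n.testBit k then '1' else '0' := by
  induction n using lsbCore.induct with
  | case1 =>
    intro k; rw [lsbCore]; simp
  | case2 n h ih =>
    intro k
    rw [lsbCore]; simp only [dif_neg h]
    cases k with
    | zero =>
      simp only [List.getD_cons_zero, Nat.testBit_zero]
      rcases Nat.mod_two_eq_zero_or_one n with h2 | h2 <;> simp [h2]
    | succ k =>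
      simp only [List.getD_cons_succ, Nat.testBit_add_one]
      exact ih k

theorem lsbCore_lt (n : Nat) : n < 2 ^ (lsbCore n).length := by
  induction n using lsbCore.induct with
  | case1 => simp [lsbCore]
  | case2 n h ih =>
    rw [lsbCore]; simp only [dif_neg h, List.length_cons, pow_succ]
    omega

theorem binInput_getD (n LN : Nat) (k : Nat) :
    ((List.replicate (LN - (binMSB n).length) '0' ++ binMSB n).reverse).getD k '0'
      = if n.testBit k then '1' else '0' := by
  rw [List.reverse_append, List.reverse_replicate]
  by_cases h : n = 0
  · subst h
    have : (binMSB 0).reverse = ['0'] := by simp [binMSB]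
    rw [this, getD_append_split]
    simp only [Nat.zero_testBit]
    split
    · cases k <;> simp_all
    · exact getD_replicate _ _
  · have hb : (binMSB n).reverse = lsbCore n := by simp [binMSB, h]
    rw [hb, getD_append_split]
    split <;> rename_i hk
    · exact lsbCore_getD n k
    · rw [getD_replicate]
      have : n.testBit k = false := by
        apply Nat.testBit_eq_false_of_lt
        calc n < 2 ^ (lsbCore n).length := lsbCore_lt n
        _ ≤ 2 ^ k := Nat.pow_le_pow_right (by omega) (by omega)
      simp [this]

theorem binInput_length (n LN : Nat) :
    (List.replicate (LN - (binMSB n).length) '0' ++ binMSB n).reverse.length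
      = (LN - (binMSB n).length) + (binMSB n).length := by
  simp; omega

theorem parseBin_reverse (bo : List Char) : parseBin bo.reverse = vOf bo := by
  rw [parseBin, List.foldl_reverse]
  induction bo with
  | nil => simp [vOf]
  | cons c t ih => simp [vOf, List.foldr_cons, ih]; omega

theorem vOf_testBit (bo : List Char) : ∀ k, (vOf bo).testBit k = decide (bo.getD k '0' = '1') := by
  induction bo with
  | nil => intro k; simp [vOf]
  | cons c t ih =>
    intro k
    cases k with
    | zero =>
      simp only [vOf, Nat.testBit_zero, List.getD_cons_zero]
      split <;> rename_i hc <;> simp [hc] <;> omega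
    | succ k =>
      simp only [vOf, Nat.testBit_add_one, List.getD_cons_succ]
      rw [← ih k]
      congr 1
      split <;> omega

theorem bitval_eq (n q : Nat) : (n >>> q) &&& 1 = if n.testBit q then 1 else 0 := by
  rw [Nat.and_one_is_mod, testBit_mod]
  have : n >>> q % 2 = 0 ∨ n >>> q % 2 = 1 := by omega
  rcases this with h | h <;> simp [h]

theorem loop_main (n LN : Nat) (bi : List Char)
    (hbi : ∀ k, bi.getD k '0' = if n.testBit k then '1' else '0') :
    ∀ (om : List (String × String)) (bo : List Char) (r : Nat),
      bo.length = LN →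
      (∀ k, r.testBit k = decide (bo.getD k '0' = '1')) →
      (∀ p ∈ om,
        0 ≤ (PySem.Int.ofStr? p.1).getD 0 ∧ 0 ≤ (PySem.Int.ofStr? p.2).getD 0 ∧
        (PySem.Int.ofStr? p.2).isSome ∧
        ((PySem.Int.ofStr? p.2).getD 0).toNat < LN ∧
        ((PySem.Int.ofStr? p.1).getD 0).toNat < bi.length) →
      (om.map (fun p => PySem.Int.ofStr? p.2)).Pairwise (· ≠ ·) →
      (∀ p ∈ om, r.testBit ((PySem.Int.ofStr? p.2).getD 0).toNat = false) →
      vOf (om.foldl (stepA bi) bo) = om.foldl (stepB n) r := by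
  intro om
  induction om with
  | nil =>
    intro bo r _ hrel _ _ _
    simp only [List.foldl_nil]
    apply Nat.eq_of_testBit_eq
    intro k
    rw [vOf_testBit, hrel]
  | cons p om ih =>
    intro bo r hbo hrel hpairs hpw hzero
    obtain ⟨hq0, hc0, hs2, hcLN, hqlen⟩ := hpairs p (List.mem_cons_self ..)
    set q : Int := (PySem.Int.ofStr? p.1).getD 0 with hqdef
    set c : Int := (PySem.Int.ofStr? p.2).getD 0 with hcdef
    have hsetA : stepA bi bo p = bo.set c.toNat (bi.getD q.toNat '0') := by
      rw [stepA, pyGet_in bi q hq0 (by omega), pySetD_in bo c _ hc0 (by omega)]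
    have hsetB : stepB n r p
        = r ||| ((if n.testBit q.toNat then 1 else 0) <<< c.toNat) := by
      rw [stepB, bitval_eq]
    have hch : bi.getD q.toNat '0' = if n.testBit q.toNat then '1' else '0' := hbi q.toNat
    simp only [List.foldl_cons, hsetA, hsetB]
    have hxbit : ∀ k, ((if n.testBit q.toNat then 1 else 0) <<< c.toNat).testBit k
        = (decide (k = c.toNat) && n.testBit q.toNat) := by
      intro k
      rw [Nat.testBit_shiftLeft]
      by_cases hcb : n.testBit q.toNat
      · simp only [hcb, if_true, Bool.and_true]
        by_cases hk : c.toNat ≤ k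
        · simp [hk, testBit_one]; omega
        · simp [hk]; omega
      · simp [hcb]
    apply ih
    · simp [hbo]
    · intro k
      rw [Nat.testBit_or, hxbit k, getD_set_eq]
      by_cases hk : k = c.toNat
      · subst hk
        rw [hzero p (List.mem_cons_self ..)]
        simp only [Bool.false_or, decide_true, Bool.true_and, true_and]
        rw [if_pos (show c.toNat < bo.length by omega), hch]
        by_cases hb : n.testBit q.toNat <;> simp [hb]
      · rw [if_neg (by omega), hrel k]
        simp [hk]
    · intro p' hp'; exact hpairs p' (List.mem_cons_of_mem _ hp')
    · exact (List.pairwise_cons.mp hpw).2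
    · intro p' hp'
      obtain ⟨_, hc0', hs2', _, _⟩ := hpairs p' (List.mem_cons_of_mem _ hp')
      have hne : PySem.Int.ofStr? p.2 ≠ PySem.Int.ofStr? p'.2 :=
        (List.pairwise_cons.mp hpw).1 _ (List.mem_map_of_mem hp')
      have hcc : ((PySem.Int.ofStr? p'.2).getD 0).toNat ≠ c.toNat := by
        intro hEq
        obtain ⟨a, ha⟩ := Option.isSome_iff_exists.mp hs2
        obtain ⟨b, hb⟩ := Option.isSome_iff_exists.mp hs2'
        have hca : c = a := by rw [hcdef, ha]; rfl
        have hcb : (PySem.Int.ofStr? p'.2).getD 0 = b := by rw [hb]; rfl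
        rw [hcb] at hEq hc0'
        rw [hca] at hEq hc0
        exact hne (by rw [ha, hb, show a = b by omega])
      rw [Nat.testBit_or, hxbit, hzero p' (List.mem_cons_of_mem _ hp')]
      simp [hcc]

-- ===== VERDICT (by name: the statement is the Claim_ definition above) =====
theorem binStr_len_gt (n : Nat) (q : Nat) (h : 2 ^ q ≤ n) : q < (binMSB n).length := by
  have hn0 : n ≠ 0 := by have := Nat.one_le_two_pow (n := q); omega
  have hlt : n < 2 ^ (lsbCore n).length := lsbCore_lt n
  have : q < (lsbCore n).length := by
    by_contra hcon
    have : 2 ^ (lsbCore n).length ≤ 2 ^ q := Nat.pow_le_pow_right (by omega) (by omega)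
    omega
  simpa [binMSB, hn0] using this

theorem remap_bitstring_py_spec : Claim_equal_remap_bitstring_py := by
  intro bs om L hdom hpre
  obtain ⟨hL, hvs, hv0, hpairs, hpw⟩ := hpre
  unfold Spec_remap_bitstring_py remap_bitstring_py remap_bitstring_py_alt
  simp only []
  rw [parseBin_reverse]
  apply congrArg pyHex
  apply loop_main ((PySem.Int.ofStr? bs).getD 0).toNat L.toNat _
      (binInput_getD ((PySem.Int.ofStr? bs).getD 0).toNat L.toNat)
  · simp
  · intro k
    rw [getD_replicate]
    simp
  · intro p hp
    obtain ⟨hs1, hs2, hq0, hc0, hcL, hrange⟩ := hpairs p hp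
    refine ⟨hq0, hc0, hs2, by omega, ?_⟩
    rw [binInput_length]
    rcases hrange with hqL | hq2
    · omega
    · have hcast : ((2 : Int) ^ ((PySem.Int.ofStr? p.1).getD 0).toNat)
          = ((2 ^ ((PySem.Int.ofStr? p.1).getD 0).toNat : Nat) : Int) := by push_cast; ring
      rw [hcast] at hq2
      have hle : 2 ^ ((PySem.Int.ofStr? p.1).getD 0).toNat ≤ ((PySem.Int.ofStr? bs).getD 0).toNat := by omega
      have := binStr_len_gt _ _ hle
      omega
  · exact hpw
  · intro p hp
    exact Nat.zero_testBit _
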